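-- pv_equiv track=rewrite | github.com/javang/codeeval | KMP.py | find_or_overlap
-- ===== SOURCE A (Python) =====
-- def find_or_overlap(left, right):
--     """
--         Find the sequence "right" in the sequence "left",
--         or if not possible, find the overlap.
--         Uses a modified version of the Knuth Morris Pratt algorithm
--         @param left Sequence to the left
--         @param right Sequence to the right
--
--         left -------------
--                       ||||
--                       --------------- right
--         @return The position where the overlap/match starts
--             and the number of overlapping/matched characters
--     """
--     table = compute_back_track_table(right);
--     index1 = 0
--     index2 = 0
--     while (index1 + index2) < len(left):
--         if right[index2] == left[index1 + index2]:
--             if index2 == len(right) - 1: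
--                 # "right" found in "left"
--                 return (index1, len(right))
--             index2 += 1
--         else:
--             index1 = index1 + index2 - table[index2]
--             if index2 > 0:
--                 index2 = table[index2]
--     # not found.
--     index2
--     return (len(left) - index2, index2) # characters matched
--
-- def compute_back_track_table(seq):
--     """ builds the backtrack table of the Knuth Morris Pratt algorithm
--         @param seq A string
--         @return the backtrack table
--     """
--     table = [0 for i in range(0,len(seq))]
--     table[0] = -1
--     table[1] = 0
--     position = 2
--     cnd = 0
--     while position < len(seq):
--         if seq[position -1 ] == seq[cnd]:
--             table[position] = cnd + 1
--             position += 1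
--             cnd += 1
--         elif cnd > 0:
--             cnd = table[cnd]
--         else:
--             table[position] = 0
--             position += 1
--
--     return table
-- ===== SOURCE B (Python) =====
-- def find_or_overlap(left, right):
--     n, m = len(left), len(right)
--     for i in range(0, n - m + 1):
--         if left[i:i+m] == right:
--             return (i, m)
--     for k in range(min(n, m - 1), 0, -1):
--         if left[n-k:] == right[:k]:
--             return (n - k, k)
--     return (n, 0)
-- ===== Notes on version B (the rewrite author's own statement) =====
-- stated objective: simpler
-- what changed: Replaces the KMP prefix-table construction and failure-link search loop with two direct scans: a naive first-occurrence scan comparing left[i:i+m] == right, then a longest suffix-prefix overlap scan comparing left[n-k:] == right[:k] for k descending.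
import Mathlib
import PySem

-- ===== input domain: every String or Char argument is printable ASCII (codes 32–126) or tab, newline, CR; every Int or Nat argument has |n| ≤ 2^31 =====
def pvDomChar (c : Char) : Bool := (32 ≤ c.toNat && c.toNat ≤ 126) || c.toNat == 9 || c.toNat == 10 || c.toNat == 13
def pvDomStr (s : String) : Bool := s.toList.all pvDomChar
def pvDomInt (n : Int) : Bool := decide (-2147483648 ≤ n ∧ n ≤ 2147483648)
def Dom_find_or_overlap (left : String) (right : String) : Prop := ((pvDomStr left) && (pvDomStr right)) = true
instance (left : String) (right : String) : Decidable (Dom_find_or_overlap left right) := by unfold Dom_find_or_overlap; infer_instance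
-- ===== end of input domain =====

-- B replaces A's KMP prefix table + failure-link loop with two direct slice-comparison scans
-- (first full occurrence, then longest suffix-prefix overlap); objective: simpler, not faster.

-- ===== PORT A =====
-- while-loop of compute_back_track_table; fuel bounds the number of iterations (proved
-- sufficient below: each step raises position or lowers cnd, at most 2*len+2 steps);
-- getD indices are in range on every reachable state, where it agrees with Python indexing.
def pvBuildLoop (seq : List Char) (fuel : Nat) (pos : Nat) (cnd : Nat) (table : List Int) : List Int :=
  match fuel with
  | 0 => table
  | fuel + 1 =>
    if pos < seq.length then
      if seq.getD (pos - 1) default == seq.getD cnd default then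
        pvBuildLoop seq fuel (pos + 1) (cnd + 1) (table.set pos ((cnd : Int) + 1))
      else if 0 < cnd then
        -- cnd = table[cnd]; table[cnd] ≥ 0 here (proved below), so toNat is exact
        pvBuildLoop seq fuel pos (table.getD cnd 0).toNat table
      else
        pvBuildLoop seq fuel (pos + 1) cnd (table.set pos 0)
    else table

def compute_back_track_table (seq : List Char) : List Int :=
  -- table = [0]*len; table[0] = -1; table[1] = 0  (Python raises IndexError if len < 2;
  -- those inputs are excluded by Pre_ below, List.set is then a no-op)
  let table := ((List.replicate seq.length (0 : Int)).set 0 (-1)).set 1 0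
  pvBuildLoop seq (2 * seq.length + 2) 2 0 table

-- main while-loop of find_or_overlap; same fuel discipline (proved sufficient below)
def pvSearchLoop (l r : List Char) (table : List Int) (fuel : Nat) (i1 i2 : Nat) : Int × Int :=
  match fuel with
  | 0 => ((l.length - i2 : Nat), (i2 : Nat))
  | fuel + 1 =>
    if i1 + i2 < l.length then
      if r.getD i2 default == l.getD (i1 + i2) default then
        if i2 = r.length - 1 then ((i1 : Nat), (r.length : Nat))
        else pvSearchLoop l r table fuel i1 (i2 + 1)
      else
        -- index1 = index1 + index2 - table[index2]  (nonnegative on reachable states, proved)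
        let tv := table.getD i2 0
        let i1' := ((i1 : Int) + (i2 : Int) - tv).toNat
        let i2' := if 0 < i2 then tv.toNat else i2
        pvSearchLoop l r table fuel i1' i2'
    else ((l.length - i2 : Nat), (i2 : Nat))  -- return (len(left) - index2, index2); i2 ≤ len(left) on reachable states

def find_or_overlap (left : String) (right : String) : Int × Int :=
  let l := left.toList
  let r := right.toList
  let table := compute_back_track_table r
  pvSearchLoop l r table (2 * l.length + 2) 0 0

-- ===== PORT B =====
-- first for-loop of B: for i in range(0, n-m+1): if left[i:i+m] == right: return i
def pvScanFull (l r : List Char) (is : List Nat) : Option Nat :=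
  match is with
  | [] => none
  | i :: is => if (l.drop i).take r.length == r then some i else pvScanFull l r is

-- range(K, 0, -1)
def pvCountdown (k : Nat) : List Nat :=
  match k with
  | 0 => []
  | k + 1 => (k + 1) :: pvCountdown k

-- second for-loop of B: for k in range(min(n, m-1), 0, -1): if left[n-k:] == right[:k]: return k
def pvScanOverlap (l r : List Char) (ks : List Nat) : Option Nat :=
  match ks with
  | [] => none
  | k :: ks => if l.drop (l.length - k) == r.take k then some k else pvScanOverlap l r ks

def pvAltCore (l r : List Char) : Int × Int :=
  let n := l.length
  let m := r.length
  match pvScanFull l r (List.range (n + 1 - m)) with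
  | some i => ((i : Nat), (m : Nat))
  | none =>
    match pvScanOverlap l r (pvCountdown (min n (m - 1))) with
    | some k => ((n - k : Nat), (k : Nat))
    | none => ((n : Nat), 0)

def find_or_overlap_alt (left : String) (right : String) : Int × Int :=
  pvAltCore left.toList right.toList

-- ===== PRECONDITION & SPEC =====
-- Pre_ excludes exactly the inputs where A raises IndexError (len(right) < 2, while
-- writing table[0] = -1 / table[1] = 0); A returns normally on every other input.
def Pre_find_or_overlap (left : String) (right : String) : Prop := 2 ≤ right.toList.length
instance (left : String) (right : String) : Decidable (Pre_find_or_overlap left right) := by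
  unfold Pre_find_or_overlap; infer_instance

def pvWitness_find_or_overlap : String × String := ("abab", "ab")

def Spec_find_or_overlap (left : String) (right : String) (out : Int × Int) : Prop :=
  out = find_or_overlap_alt left right
instance (left : String) (right : String) (out : Int × Int) : Decidable (Spec_find_or_overlap left right out) := by
  unfold Spec_find_or_overlap; infer_instance

-- ===== CLAIM (what is proved, stated in full; the proofs are below) =====
def Claim_equal_find_or_overlap : Prop := ∀ (left : String) (right : String),
  Dom_find_or_overlap left right → Pre_find_or_overlap left right →
  Spec_find_or_overlap left right (find_or_overlap left right)

-- ===== LEMMAS AND PROOFS =====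

-- `PvCand l r t k` : the last k characters of l[:t] equal r[:k] (a "candidate overlap")
def PvCand (l r : List Char) (t k : Nat) : Prop :=
  k ≤ t ∧ t ≤ l.length ∧ k ≤ r.length ∧ ∀ j, j < k → l[t - k + j]? = r[j]?

-- longest proper border of r[:p]
def pvB (r : List Char) (p : Nat) : Nat :=
  Nat.findGreatest (fun k => (r.drop (p - k)).take k = r.take k) (p - 1)

def pvTb (r : List Char) (p : Nat) : Int := if p = 0 then -1 else (pvB r p : Nat)

lemma pv_slice_iff (l r : List Char) (t k : Nat) :
    ((l.drop (t - k)).take k = r.take k) ↔ (∀ j, j < k → l[t - k + j]? = r[j]?) := by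
  rw [List.ext_getElem?_iff]
  constructor
  · intro h j hj
    have := h j
    simpa [List.getElem?_take, List.getElem?_drop, hj] using this
  · intro h j
    by_cases hj : j < k
    · simpa [List.getElem?_take, List.getElem?_drop, hj] using h j hj
    · simp [List.getElem?_take, List.getElem?_drop, hj]

lemma pvCand_of_slice (l r : List Char) (t k : Nat) (h1 : k ≤ t) (h2 : t ≤ l.length)
    (h3 : k ≤ r.length) (h : (l.drop (t - k)).take k = r.take k) : PvCand l r t k :=
  ⟨h1, h2, h3, (pv_slice_iff l r t k).1 h⟩

lemma pv_slice_of_cand (l r : List Char) (t k : Nat) (h : PvCand l r t k) :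
    (l.drop (t - k)).take k = r.take k :=
  (pv_slice_iff l r t k).2 h.2.2.2

lemma pvCand_extend (l r : List Char) (t k : Nat) (h : PvCand l r t k)
    (ht : t < l.length) (hk : k < r.length) (hc : l[t]? = r[k]?) :
    PvCand l r (t + 1) (k + 1) := by
  obtain ⟨h1, h2, h3, h4⟩ := h
  refine ⟨by omega, by omega, by omega, ?_⟩
  intro j hj
  rcases Nat.lt_or_ge j k with hjk | hjk
  · have := h4 j hjk
    have e : t + 1 - (k + 1) + j = t - k + j := by omega
    rw [e]; exact this
  · have hjk' : j = k := by omega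
    rw [hjk']
    have e : t + 1 - (k + 1) + k = t := by omega
    rw [e]; exact hc

lemma pvCand_shrink (l r : List Char) (t k : Nat) (h : PvCand l r (t + 1) k) (hk : 1 ≤ k) :
    PvCand l r t (k - 1) ∧ l[t]? = r[k - 1]? := by
  obtain ⟨h1, h2, h3, h4⟩ := h
  constructor
  · refine ⟨by omega, by omega, by omega, ?_⟩
    intro j hj
    have := h4 j (by omega)
    have e : t - (k - 1) + j = t + 1 - k + j := by omega
    rw [e]; exact this
  · have := h4 (k - 1) (by omega)
    have e : t + 1 - k + (k - 1) = t := by omega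
    rw [e] at this; exact this

lemma pvCand_nest (l r : List Char) (t k k' : Nat) (h : PvCand l r t k) (h' : PvCand l r t k')
    (hkk : k ≤ k') : PvCand r r k' k := by
  obtain ⟨h1, h2, h3, h4⟩ := h
  obtain ⟨h1', h2', h3', h4'⟩ := h'
  refine ⟨hkk, h3', h3, ?_⟩
  intro j hj
  have e1 := h4 j hj
  have e2 := h4' (k' - k + j) (by omega)
  have e : t - k' + (k' - k + j) = t - k + j := by omega
  rw [e] at e2
  rw [← e1, ← e2]

lemma pvCand_trans (l r : List Char) (t p c : Nat) (h : PvCand r r p c) (h' : PvCand l r t p) :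
    PvCand l r t c := by
  obtain ⟨h1, h2, h3, h4⟩ := h
  obtain ⟨h1', h2', h3', h4'⟩ := h'
  refine ⟨by omega, h2', h3, ?_⟩
  intro j hj
  have e1 := h4 j hj
  have e2 := h4' (p - c + j) (by omega)
  have e : t - p + (p - c + j) = t - c + j := by omega
  rw [e] at e2
  rw [e2, e1]

lemma pvB_le (r : List Char) (p : Nat) : pvB r p ≤ p - 1 := Nat.findGreatest_le _

lemma pvB_cand (r : List Char) (p : Nat) (hp : 1 ≤ p) (hpr : p ≤ r.length) :
    PvCand r r p (pvB r p) := by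
  have h0 : ((fun k => (r.drop (p - k)).take k = r.take k) 0) := by simp
  have hs := Nat.findGreatest_spec (P := fun k => (r.drop (p - k)).take k = r.take k)
    (Nat.zero_le (p - 1)) h0
  exact pvCand_of_slice r r p _ (by have := pvB_le r p; omega) hpr
    (by have := pvB_le r p; omega) hs

lemma pvB_ge (r : List Char) (p k : Nat) (hk : PvCand r r p k) (hk2 : k < p) : k ≤ pvB r p :=
  Nat.le_findGreatest (by omega) (pv_slice_of_cand r r p k hk)

lemma pvB_max (r : List Char) (p k : Nat) (hk : PvCand r r p k) (hk2 : k < p) (h : pvB r p < k) :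
    False := by
  exact absurd (pvB_ge r p k hk hk2) (by omega)

-- getD vs getElem? with both indices in range
lemma pv_getD_iff (l r : List Char) (i j : Nat) (hi : i < l.length) (hj : j < r.length) :
    (l.getD i default = r.getD j default) ↔ l[i]? = r[j]? := by
  rw [List.getD_eq_getElem?_getD, List.getD_eq_getElem?_getD,
    List.getElem?_eq_getElem hi, List.getElem?_eq_getElem hj]
  simp

lemma pv_getD_set (xs : List Int) (i j : Nat) (v : Int) :
    (xs.set i v).getD j 0 = if i = j ∧ i < xs.length then v else xs.getD j 0 := by
  rw [List.getD_eq_getElem?_getD, List.getD_eq_getElem?_getD, List.getElem?_set]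
  by_cases h1 : i = j
  · subst h1
    by_cases h2 : i < xs.length
    · simp [h2]
    · have hn : xs[i]? = none := by
        rw [List.getElem?_eq_none_iff]; omega
      simp [h2, hn]
  · simp [h1]

-- ===== backtrack-table correctness =====

lemma pvBuild_inv (r : List Char) :
    ∀ (fuel pos cnd : Nat) (table : List Int),
    pos ≤ r.length → cnd + 2 ≤ pos →
    table.length = r.length →
    (∀ q, q < pos → table.getD q 0 = pvTb r q) →
    PvCand r r (pos - 1) cnd →
    (∀ k, k < pos → PvCand r r pos k → k ≤ cnd + 1) →
    2 * (r.length - pos) + cnd + 1 ≤ fuel →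
    ∀ q, q < r.length → (pvBuildLoop r fuel pos cnd table).getD q 0 = pvTb r q := by
  intro fuel
  induction fuel with
  | zero => intro pos cnd table _ _ _ _ _ _ hf; omega
  | succ fuel ih =>
    intro pos cnd table hpos hcnd hlen htab hc hmax hf q hq
    rw [pvBuildLoop]
    by_cases hg : pos < r.length
    · simp only [hg, if_true]
      have hp1 : pos - 1 < r.length := by omega
      have hcl : cnd < r.length := by omega
      by_cases hch : r.getD (pos - 1) default == r.getD cnd default
      · simp only [hch, if_true]
        have hchar : r[pos - 1]? = r[cnd]? :=
          (pv_getD_iff r r (pos - 1) cnd hp1 hcl).1 (by simpa using hch)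
        -- new candidate cnd+1 for r[:pos], and it is the border
        have hcand : PvCand r r pos (cnd + 1) := by
          have := pvCand_extend r r (pos - 1) cnd hc hp1 hcl hchar
          simpa [Nat.sub_add_cancel (show 1 ≤ pos by omega)] using this
        have hbp : pvB r pos = cnd + 1 := by
          have hge : cnd + 1 ≤ pvB r pos := pvB_ge r pos (cnd + 1) hcand (by omega)
          have hle : pvB r pos ≤ cnd + 1 := by
            have hbc := pvB_cand r pos (by omega) (by omega)
            exact hmax _ (by have := pvB_le r pos; omega) hbc
          omega
        refine ih (pos + 1) (cnd + 1) (table.set pos ((cnd : Int) + 1)) (by omega) (by omega)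
          (by simpa using hlen) ?_ (by simpa using hcand) ?_ (by omega) q hq
        · intro q' hq'
          rw [pv_getD_set]
          by_cases hqp : pos = q'
          · subst hqp
            simp [hlen, hg, pvTb, hbp, show pos ≠ 0 by omega]
          · simp only [hqp, false_and, if_false]
            exact htab q' (by omega)
        · intro k hk hkc
          rcases Nat.eq_zero_or_pos k with hk0 | hk0
          · omega
          · obtain ⟨hsh, _⟩ := pvCand_shrink r r pos k hkc hk0
            have := hmax (k - 1) (by omega) hsh
            omega
      · simp only [hch, if_false]
        have hchar : ¬ (r[pos - 1]? = r[cnd]?) := by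
          intro h
          exact hch (by simpa using (pv_getD_iff r r (pos - 1) cnd hp1 hcl).2 h)
        by_cases hc0 : 0 < cnd
        · simp only [hc0, if_true]
          have htv : table.getD cnd 0 = ((pvB r cnd : Nat) : Int) := by
            rw [htab cnd (by omega)]; simp [pvTb, show cnd ≠ 0 by omega]
          have htvn : (table.getD cnd 0).toNat = pvB r cnd := by rw [htv]; simp
          have hble : pvB r cnd ≤ cnd - 1 := pvB_le r cnd
          have hbc : PvCand r r cnd (pvB r cnd) := pvB_cand r cnd (by omega) (by omega)
          rw [htvn]
          refine ih pos (pvB r cnd) table hpos (by omega) hlen htab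
            (pvCand_trans r r (pos - 1) cnd (pvB r cnd) hbc hc) ?_ (by omega) q hq
          · intro k hk hkc
            rcases Nat.eq_zero_or_pos k with hk0 | hk0
            · omega
            have hk1 := hmax k hk hkc
            obtain ⟨hsh, hce⟩ := pvCand_shrink r r (pos - 1) k
              (by simpa [Nat.sub_add_cancel (show 1 ≤ pos by omega)] using hkc) hk0
            by_cases hkc1 : k = cnd + 1
            · exfalso; apply hchar; rw [hce, hkc1]; simp
            · -- k ≤ cnd, so k-1 < cnd is a border candidate of r[:cnd]
              have hkle : k ≤ cnd := by omega
              have hnest : PvCand r r cnd (k - 1) :=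
                pvCand_nest r r (pos - 1) (k - 1) cnd hsh hc (by omega)
              have := pvB_ge r cnd (k - 1) hnest (by omega)
              omega
        · simp only [hc0, if_false]
          have hcz : cnd = 0 := by omega
          subst hcz
          have hbp : pvB r pos = 0 := by
            rcases Nat.eq_zero_or_pos (pvB r pos) with h0 | h0
            · exact h0
            exfalso
            have hbc := pvB_cand r pos (by omega) (by omega)
            have hb1 : pvB r pos ≤ 1 := hmax _ (by have := pvB_le r pos; omega) hbc
            have hbe : pvB r pos = 1 := by omega
            rw [hbe] at hbc
            obtain ⟨_, hce⟩ := pvCand_shrink r r (pos - 1) 1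
              (by simpa [Nat.sub_add_cancel (show 1 ≤ pos by omega)] using hbc) (by omega)
            exact hchar (by simpa using hce)
          refine ih (pos + 1) 0 (table.set pos 0) (by omega) (by omega)
            (by simpa using hlen) ?_ ⟨by omega, by omega, by omega, by omega⟩ ?_ (by omega) q hq
          · intro q' hq'
            rw [pv_getD_set]
            by_cases hqp : pos = q'
            · subst hqp
              simp [hlen, hg, pvTb, hbp, show pos ≠ 0 by omega]
            · simp only [hqp, false_and, if_false]
              exact htab q' (by omega)
          · intro k hk hkc
            rcases Nat.eq_zero_or_pos k with hk0 | hk0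
            · omega
            obtain ⟨hsh, hce⟩ := pvCand_shrink r r pos k hkc hk0
            have hk1 := hmax (k - 1) (by omega) hsh
            by_cases hke : k - 1 = 1
            · exfalso
              obtain ⟨_, hce2⟩ := pvCand_shrink r r (pos - 1) 1
                (by simpa [Nat.sub_add_cancel (show 1 ≤ pos by omega), hke] using hsh) (by omega)
              exact hchar (by simpa using hce2)
            · omega
    · simp only [hg, if_false]
      have : pos = r.length := by omega
      exact htab q (by omega)

lemma pv_table_correct (r : List Char) (hm : 2 ≤ r.length) :
    ∀ q, q < r.length → (compute_back_track_table r).getD q 0 = pvTb r q := by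
  intro q hq
  unfold compute_back_track_table
  have hlen : (((List.replicate r.length (0 : Int)).set 0 (-1)).set 1 0).length = r.length := by
    simp
  refine pvBuild_inv r (2 * r.length + 2) 2 0 _ hm (by omega) hlen ?_
    ⟨by omega, by omega, by omega, by omega⟩ ?_ (by omega) q hq
  · intro q' hq'
    interval_cases q'
    · rw [pv_getD_set]
      simp [pvTb, hm, show (0:Nat) < r.length by omega]
    · rw [pv_getD_set]
      simp only [List.length_set, List.length_replicate]
      simp [pvTb, show (1:Nat) < r.length by omega, pvB]
  · intro k hk hkc
    omega

-- ===== B-side scan characterisations =====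

lemma pvScanFull_append (l r : List Char) (as bs : List Nat) :
    pvScanFull l r (as ++ bs) =
      (match pvScanFull l r as with | some i => some i | none => pvScanFull l r bs) := by
  induction as with
  | nil => simp [pvScanFull]
  | cons a as ih =>
    simp only [List.cons_append, pvScanFull]
    by_cases h : (l.drop a).take r.length == r
    · simp [h]
    · simp [h, ih]

lemma pvScanFull_none (l r : List Char) (N : Nat)
    (h : ∀ j, j < N → ¬ ((l.drop j).take r.length = r)) :
    pvScanFull l r (List.range N) = none := by
  induction N with
  | zero => simp [pvScanFull]
  | succ N ih =>
    rw [List.range_succ, pvScanFull_append]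
    rw [ih (fun j hj => h j (by omega))]
    simp only [pvScanFull]
    have := h N (by omega)
    simp [this]

lemma pvScanFull_some (l r : List Char) (N i : Nat) (hi : i < N)
    (hpi : (l.drop i).take r.length = r) (hmin : ∀ j, j < i → ¬ ((l.drop j).take r.length = r)) :
    pvScanFull l r (List.range N) = some i := by
  induction N with
  | zero => omega
  | succ N ih =>
    rw [List.range_succ, pvScanFull_append]
    by_cases hN : i = N
    · rw [pvScanFull_none l r N (fun j hj => hmin j (by omega))]
      rw [hN] at hpi
      simp only [pvScanFull]
      simp [pvScanFull, hpi, hN]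
    · have hi' : i < N := by omega
      rw [ih hi']

lemma pvScanOverlap_none (l r : List Char) (K : Nat)
    (h : ∀ j, 1 ≤ j → j ≤ K → ¬ (l.drop (l.length - j) = r.take j)) :
    pvScanOverlap l r (pvCountdown K) = none := by
  induction K with
  | zero => simp [pvCountdown, pvScanOverlap]
  | succ K ih =>
    simp only [pvCountdown, pvScanOverlap]
    have := h (K + 1) (by omega) (by omega)
    simp only [beq_iff_eq, this, if_false]
    exact ih (fun j h1 h2 => h j h1 (by omega))

lemma pvScanOverlap_some (l r : List Char) (K i : Nat) (h1 : 1 ≤ i) (h2 : i ≤ K)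
    (hpi : l.drop (l.length - i) = r.take i)
    (hmax : ∀ j, i < j → j ≤ K → ¬ (l.drop (l.length - j) = r.take j)) :
    pvScanOverlap l r (pvCountdown K) = some i := by
  induction K with
  | zero => omega
  | succ K ih =>
    simp only [pvCountdown, pvScanOverlap]
    by_cases hik : i = K + 1
    · subst hik; simp [hpi]
    · have := hmax (K + 1) (by omega) (by omega)
      simp only [beq_iff_eq, this, if_false]
      exact ih (by omega) (fun j hj1 hj2 => hmax j hj1 (by omega))

-- full-occurrence test as PvCand
lemma pvFull_iff (l r : List Char) (j : Nat) (hj : j + r.length ≤ l.length) :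
    ((l.drop j).take r.length = r) ↔ PvCand l r (j + r.length) r.length := by
  constructor
  · intro h
    refine pvCand_of_slice l r (j + r.length) r.length (by omega) hj le_rfl ?_
    simpa [Nat.add_sub_cancel, List.take_length] using h
  · intro h
    have := pv_slice_of_cand l r (j + r.length) r.length h
    simpa [Nat.add_sub_cancel, List.take_length] using this

-- overlap test as PvCand
lemma pvOver_iff (l r : List Char) (k : Nat) (hk : k ≤ l.length) (hkr : k ≤ r.length) :
    (l.drop (l.length - k) = r.take k) ↔ PvCand l r l.length k := by
  have hlen : (l.drop (l.length - k)).length = k := by simp; omega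
  have htk : (l.drop (l.length - k)).take k = l.drop (l.length - k) := by
    apply List.take_of_length_le; omega
  constructor
  · intro h
    exact pvCand_of_slice l r l.length k hk le_rfl hkr (by rw [htk]; exact h)
  · intro h
    have := pv_slice_of_cand l r l.length k h
    rw [htk] at this; exact this

-- ===== search-loop correctness =====

lemma pvSearch_inv (l r : List Char) (hm : 2 ≤ r.length) (table : List Int)
    (htab : ∀ q, q < r.length → table.getD q 0 = pvTb r q) :
    ∀ (fuel i1 i2 : Nat),
    i2 ≤ r.length - 1 → i1 + i2 ≤ l.length →
    PvCand l r (i1 + i2) i2 →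
    (∀ k, PvCand l r (i1 + i2) k → i2 < k →
        i1 + i2 < l.length ∧ k < r.length ∧ ¬ (l[i1 + i2]? = r[k]?)) →
    (∀ j, j + r.length ≤ i1 + i2 → ¬ PvCand l r (j + r.length) r.length) →
    2 * (l.length - (i1 + i2)) + i2 + 1 ≤ fuel →
    pvSearchLoop l r table fuel i1 i2 = pvAltCore l r := by
  intro fuel
  induction fuel with
  | zero => intro i1 i2 _ _ _ _ _ hf; omega
  | succ fuel ih =>
    intro i1 i2 hi2 ht hc hA hB hf
    rw [pvSearchLoop]
    by_cases hg : i1 + i2 < l.length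
    · simp only [hg, if_true]
      have hi2r : i2 < r.length := by omega
      by_cases hch : r.getD i2 default == l.getD (i1 + i2) default
      · simp only [hch, if_true]
        have hchar : l[i1 + i2]? = r[i2]? :=
          ((pv_getD_iff r l i2 (i1 + i2) hi2r hg).1 (by simpa using hch)).symm
        have hext : PvCand l r (i1 + i2 + 1) (i2 + 1) :=
          pvCand_extend l r (i1 + i2) i2 hc hg hi2r hchar
        -- larger candidates at t+1 are impossible (InvA-step)
        have hA' : ∀ k, PvCand l r (i1 + i2 + 1) k → i2 + 1 < k → False := by
          intro k hk hik
          obtain ⟨hsh, hce⟩ := pvCand_shrink l r (i1 + i2) k hk (by omega)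
          exact (hA (k - 1) hsh (by omega)).2.2 hce
        by_cases hend : i2 = r.length - 1
        · simp only [hend, if_true]
          -- full match found at i1; show B's first scan finds exactly i1
          have hocc : PvCand l r (i1 + r.length) r.length := by
            have : i1 + i2 + 1 = i1 + r.length := by omega
            rw [← this]
            have : i2 + 1 = r.length := by omega
            rw [← this]
            exact hext
          have hfind : pvScanFull l r (List.range (l.length + 1 - r.length)) = some i1 := by
            refine pvScanFull_some l r _ i1 (by omega) ?_ ?_
            · exact (pvFull_iff l r i1 (by omega)).2 hocc
            · intro j hj hcon
              exact hB j (by omega) ((pvFull_iff l r j (by omega)).1 hcon)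
          simp [pvAltCore, hfind]
        · simp only [hend, if_false]
          refine ih i1 (i2 + 1) (by omega) (by omega)
            (by rw [show i1 + (i2 + 1) = i1 + i2 + 1 by omega]; exact hext) ?_ ?_ (by omega)
          · intro k hk hik
            exact absurd (hA' k (by rwa [show i1 + i2 + 1 = i1 + (i2 + 1) by omega]) hik) not_false
          · intro j hj
            rw [show i1 + (i2 + 1) = i1 + i2 + 1 by omega] at hj
            rcases Nat.lt_or_ge (j + r.length) (i1 + i2 + 1) with hlt | hge
            · exact hB j (by omega)
            · have hje : j + r.length = i1 + i2 + 1 := by omega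
              intro hcon
              rw [hje] at hcon
              exact hA' r.length hcon (by omega)
      · simp only [hch, if_false]
        have hchar : ¬ (l[i1 + i2]? = r[i2]?) := by
          intro h
          exact hch (by simpa using (pv_getD_iff r l i2 (i1 + i2) hi2r hg).2 h.symm)
        by_cases hz : 0 < i2
        · have htv : table.getD i2 0 = ((pvB r i2 : Nat) : Int) := by
            rw [htab i2 hi2r]; simp [pvTb, show i2 ≠ 0 by omega]
          have hble : pvB r i2 ≤ i2 - 1 := pvB_le r i2
          have hbc : PvCand r r i2 (pvB r i2) := pvB_cand r i2 (by omega) (by omega)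
          have hi1' : ((i1 : Int) + (i2 : Int) - table.getD i2 0).toNat
              = i1 + i2 - pvB r i2 := by
            rw [htv]; omega
          have hi2' : (if 0 < i2 then (table.getD i2 0).toNat else i2) = pvB r i2 := by
            rw [if_pos hz, htv]; simp
          simp only [hi1', hi2']
          have hteq : i1 + i2 - pvB r i2 + pvB r i2 = i1 + i2 := by omega
          refine ih (i1 + i2 - pvB r i2) (pvB r i2) (by omega) (by omega)
            (by rw [hteq]; exact pvCand_trans l r (i1 + i2) i2 (pvB r i2) hbc hc) ?_ ?_ (by omega)
          · intro k hk hik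
            rw [hteq] at hk ⊢
            refine ⟨hg, ?_, ?_⟩
            · rcases Nat.lt_or_ge i2 k with hik2 | hik2
              · exact (hA k hk hik2).2.1
              · omega
            · rcases Nat.lt_or_ge i2 k with hik2 | hik2
              · exact (hA k hk hik2).2.2
              · by_cases hke : k = i2
                · subst hke; exact hchar
                · -- pvB r i2 < k < i2 would be a larger border of r[:i2]
                  exfalso
                  have hnest : PvCand r r i2 k := pvCand_nest l r (i1 + i2) k i2 hk hc (by omega)
                  exact pvB_max r i2 k hnest (by omega) (by omega)
          · intro j hj; rw [hteq] at hj; exact hB j hj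
        · have hz0 : i2 = 0 := by omega
          subst hz0
          have htv : table.getD 0 0 = -1 := by rw [htab 0 (by omega)]; simp [pvTb]
          have hi1' : ((i1 : Int) + (0 : Nat) - table.getD 0 0).toNat = i1 + 1 := by
            rw [htv]; omega
          simp only [hi1', if_neg (by omega : ¬ (0:Nat) < 0)]
          have hA' : ∀ k, PvCand l r (i1 + 1) k → 0 < k → False := by
            intro k hk hik
            obtain ⟨hsh, hce⟩ := pvCand_shrink l r (i1 + 0) k
              (by rwa [show i1 + 0 + 1 = i1 + 1 by omega] at hk) (by omega)
            rcases Nat.eq_zero_or_pos (k - 1) with hk1 | hk1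
            · rw [hk1] at hce; exact hchar hce
            · exact (hA (k - 1) hsh (by omega)).2.2 hce
          refine ih (i1 + 1) 0 (by omega) (by omega)
            ⟨by omega, by omega, by omega, by omega⟩ ?_ ?_ (by omega)
          · intro k hk hik
            exact absurd (hA' k (by rwa [show i1 + 1 + 0 = i1 + 1 by omega] at hk) hik) not_false
          · intro j hj hcon
            rw [show i1 + 1 + 0 = i1 + 1 by omega] at hj
            rcases Nat.lt_or_ge (j + r.length) (i1 + 1) with hlt | hge
            · exact hB j (by omega) hcon
            · have hje : j + r.length = i1 + 1 := by omega
              rw [hje] at hcon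
              exact hA' r.length hcon (by omega)
    · -- loop exit: i1 + i2 = len(left)
      simp only [hg, if_false]
      have hte : i1 + i2 = l.length := by omega
      -- no full occurrence anywhere
      have hnone : pvScanFull l r (List.range (l.length + 1 - r.length)) = none := by
        refine pvScanFull_none l r _ ?_
        intro j hj hcon
        exact hB j (by omega) ((pvFull_iff l r j (by omega)).1 hcon)
      -- i2 is the longest overlap
      have hcn : PvCand l r l.length i2 := by rwa [hte] at hc
      have hAn : ∀ k, PvCand l r l.length k → i2 < k → False := by
        intro k hk hik
        have := (hA k (by rwa [hte]) hik).1
        omega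
      rcases Nat.eq_zero_or_pos i2 with hz | hz
      · subst hz
        have hov : pvScanOverlap l r (pvCountdown (min l.length (r.length - 1))) = none := by
          refine pvScanOverlap_none l r _ ?_
          intro j h1 h2 hcon
          exact hAn j ((pvOver_iff l r j (by omega) (by omega)).1 hcon) (by omega)
        simp [pvAltCore, hnone, hov]
      · have hov : pvScanOverlap l r (pvCountdown (min l.length (r.length - 1))) = some i2 := by
          refine pvScanOverlap_some l r _ i2 hz (by omega) ?_ ?_
          · exact (pvOver_iff l r i2 (by omega) (by omega)).2 hcn
          · intro j hj1 hj2 hcon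
            exact hAn j ((pvOver_iff l r j (by omega) (by omega)).1 hcon) hj1
        simp [pvAltCore, hnone, hov]

-- ===== VERDICT (by name: the statement is the Claim_ definition above) =====
theorem find_or_overlap_spec : Claim_equal_find_or_overlap := by
  intro left right _hdom hpre
  unfold Spec_find_or_overlap find_or_overlap find_or_overlap_alt
  have hm : 2 ≤ right.toList.length := hpre
  exact pvSearch_inv left.toList right.toList hm _
    (pv_table_correct right.toList hm)
    (2 * left.toList.length + 2) 0 0 (by omega) (by omega)
    ⟨by omega, by omega, by omega, by omega⟩
    (by intro k hk hik; obtain ⟨h1, _, _, _⟩ := hk; omega)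
    (by intro j hj; omega)
    (by omega)
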